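-- pv_equiv track=rewrite | github.com/qBraid/qBraid | qbraid/api/OpenQASMCircuitDrawer.py | get_available_pos
-- ===== SOURCE A (Python) =====
-- one_qubit_gates = [
--     "i",
--     "x",
--     "y",
--     "z",
--     "h",
--     "s",
--     "si",
--     "v",
--     "vi",
--     "rx",
--     "ry",
--     "rz",
--     "gpi",
--     "gpi2"
-- ]
--
-- def get_available_pos(gate, reg_idxes, mat, num_qubits, num_bits):
--     """
--     Gets the correct x and y coordinates to insert the gate
--     x and y refer to the top left corner of the gate
--     """
--
--     if gate.find("(") != -1: # Parameterized gate
--         gate = gate[:gate.find("(")] # Get just the name of the gate, not the parameters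
--
--     if gate not in one_qubit_gates: # Additional logic is necessary to write across multiple lines
--
--         # Case for measurement gate
--         if gate[0] == "m" and gate[1:].isdigit():
--
--
--             reg_idxes = range(reg_idxes[0], (num_qubits+int(gate[1:]))) # Register indexes that need to be written over
--
--     # Column counter to insert the gate, start at the far right and work backwards
--     column_idx = len(mat[0])
--     collision = False
--     while column_idx != 0: # Can't go farther left
--         for idx in range(len(reg_idxes)): # Check each register the gate will be overwriting
--             if mat[reg_idxes[idx] * 3 + 1][column_idx-1] != ' ': # If not empty, then collision occurs
--                 collision = True
--                 column_idx += 3 # Move the gate three spaces to the right to avoid overwriting previous gates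
--                 break
--
--         if collision:
--             break
--
--         column_idx -= 1
--
--     return column_idx, reg_idxes[0]*3
-- ===== SOURCE B (Python) =====
-- one_qubit_gates = [
--     "i",
--     "x",
--     "y",
--     "z",
--     "h",
--     "s",
--     "si",
--     "v",
--     "vi",
--     "rx",
--     "ry",
--     "rz",
--     "gpi",
--     "gpi2"
-- ]
--
-- def get_available_pos(gate, reg_idxes, mat, num_qubits, num_bits):
--     """
--     Row-major re-implementation: instead of scanning columns right-to-left and
--     probing every register row per column, scan each relevant row once for its
--     rightmost non-space cell and take the maximum over rows.
--     """
--     if gate.find("(") != -1:  # Parameterized gate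
--         gate = gate[:gate.find("(")]
--
--     if gate not in one_qubit_gates:
--         # Case for measurement gate
--         if gate[0] == "m" and gate[1:].isdigit():
--             reg_idxes = range(reg_idxes[0], (num_qubits + int(gate[1:])))
--
--     width = len(mat[0])
--     m = 0
--     if width:
--         for r in reg_idxes:
--             seg = mat[r * 3 + 1][:width]
--             j = len(seg)
--             while j > 0 and seg[j - 1] == ' ':
--                 j -= 1
--             if j > m:
--                 m = j
--             if m == width:
--                 break  # rightmost column already occupied: the maximum is attained
--     return (m + 3 if m else 0), reg_idxes[0] * 3
-- ===== Notes on version B (the rewrite author's own statement) =====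
-- stated objective: alternative
-- what changed: Replaced A's column-major right-to-left scan (probe every register row per column, early exit on first collision) by a row-major pass: each relevant row is scanned once for its rightmost non-space cell, the maximum over rows gives the column, stopping early once the maximum possible value is attained.
import Mathlib
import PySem

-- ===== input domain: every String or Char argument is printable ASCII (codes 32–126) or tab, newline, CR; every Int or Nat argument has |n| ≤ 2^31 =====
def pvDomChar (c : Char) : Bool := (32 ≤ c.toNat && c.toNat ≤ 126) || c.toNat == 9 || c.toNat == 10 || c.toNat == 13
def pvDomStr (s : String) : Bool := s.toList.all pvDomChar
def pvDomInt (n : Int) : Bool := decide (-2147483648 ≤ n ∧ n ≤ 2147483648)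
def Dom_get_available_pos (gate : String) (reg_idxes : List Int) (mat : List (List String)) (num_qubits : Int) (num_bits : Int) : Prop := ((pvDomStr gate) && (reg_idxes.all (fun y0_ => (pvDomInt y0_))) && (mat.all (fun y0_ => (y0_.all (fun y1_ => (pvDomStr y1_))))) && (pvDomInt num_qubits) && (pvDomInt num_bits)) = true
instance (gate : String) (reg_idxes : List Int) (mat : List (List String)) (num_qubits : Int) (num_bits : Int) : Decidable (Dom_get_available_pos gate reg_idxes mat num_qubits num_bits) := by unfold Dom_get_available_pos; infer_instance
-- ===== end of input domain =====

-- B replaces A's column-major right-to-left collision scan by one row-major pass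
-- (rightmost non-space cell per register row, maximum over rows): an alternative
-- decomposition of the same computation, proved to return the same pair on Pre_.


-- shared module constant (both Source A and Source B carry it verbatim)
def one_qubit_gates : List String := ["i", "x", "y", "z", "h", "s", "si", "v", "vi", "rx", "ry", "rz", "gpi", "gpi2"]

-- Python's lazy `range(a, b)` object vs a plain list of register indexes; like
-- CPython, the element list is only materialised when it is iterated
def regList : (List Int) ⊕ (Int × Int) → List Int
  | Sum.inl l => l
  | Sum.inr (a, b) => PySem.List.pyRange a b 1

-- reg_idxes[0] (default irrelevant: Pre_ guarantees nonempty / nonempty range)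
def regHead : (List Int) ⊕ (Int × Int) → Int
  | Sum.inl l => l.head?.getD 0
  | Sum.inr (a, _) => a

-- gate = gate[:gate.find("(")] when "(" occurs (identical lines in Source A and Source B)
def pyGateName (gate : String) : String :=
  if PySem.Str.find gate "(" ≠ -1 then PySem.Str.slice gate none (some (PySem.Str.find gate "(")) else gate

-- the measurement-gate reassignment reg_idxes = range(reg_idxes[0], num_qubits + int(gate[1:]))
-- (identical lines in Source A and Source B); defaults are only read under Pre_
def pyRegIdxes (gate : String) (reg_idxes : List Int) (num_qubits : Int) : (List Int) ⊕ (Int × Int) :=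
  if gate ∈ one_qubit_gates then Sum.inl reg_idxes
  else if (PySem.Str.pyGet? gate 0).getD ' ' = 'm' ∧ PySem.Str.strIsdigit (PySem.Str.slice gate (some 1) none) = true then
    Sum.inr (reg_idxes.head?.getD 0, num_qubits + (PySem.Int.ofStr? (PySem.Str.slice gate (some 1) none)).getD 0)
  else Sum.inl reg_idxes

-- ===== PORT A =====
-- `for idx in range(len(reg_idxes)): if mat[reg_idxes[idx]*3+1][column_idx-1] != ' ': …break`
def aCollide (R : (List Int) ⊕ (Int × Int)) (mat : List (List String)) (c : Int) : Bool :=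
  (regList R).any (fun r => !(PySem.List.pyGetD ((PySem.List.pyGet? mat (r * 3 + 1)).getD []) (c - 1) " " == " "))

-- `while column_idx != 0: … column_idx -= 1`, with `column_idx += 3; break` on collision
def aLoop (R : (List Int) ⊕ (Int × Int)) (mat : List (List String)) : Nat → Int
  | 0 => 0
  | n + 1 => if aCollide R mat ((n : Int) + 1) then (n : Int) + 1 + 3 else aLoop R mat n

def get_available_pos (gate : String) (reg_idxes : List Int) (mat : List (List String)) (num_qubits : Int) (num_bits : Int) : Int × Int :=
  let gate := pyGateName gate
  let R := pyRegIdxes gate reg_idxes num_qubits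
  (aLoop R mat ((mat.head?.getD []).length), regHead R * 3)

-- ===== PORT B =====
-- `j = len(seg); while j > 0 and seg[j-1] == ' ': j -= 1`
def bRight (seg : List String) : Nat → Nat
  | 0 => 0
  | j + 1 => if seg.getD j " " == " " then bRight seg j else j + 1

-- `for r in reg_idxes: … ; if m == width: break`
def bScan (mat : List (List String)) (width : Nat) : List Int → Nat → Nat
  | [], m => m
  | r :: rest, m =>
    let seg := PySem.List.slice ((PySem.List.pyGet? mat (r * 3 + 1)).getD []) none (some (width : Int))
    let j := bRight seg seg.length
    let m' := if j > m then j else m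
    if m' = width then m' else bScan mat width rest m'

def get_available_pos_alt (gate : String) (reg_idxes : List Int) (mat : List (List String)) (num_qubits : Int) (num_bits : Int) : Int × Int :=
  let gate := pyGateName gate
  let R := pyRegIdxes gate reg_idxes num_qubits
  let width := (mat.head?.getD []).length
  let m : Nat := if 0 < width then bScan mat width (regList R) 0 else 0
  ((if m ≠ 0 then (m : Int) + 3 else 0), regHead R * 3)

-- ===== PRECONDITION & SPEC =====
-- a register row is accessible at the rightmost column: index in Python range and at least width cells
def pvAcc (mat : List (List String)) (width : Nat) (r : Int) : Bool :=
  match PySem.List.pyGet? mat (r * 3 + 1) with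
  | some row => width ≤ row.length
  | none => false

-- the register row holds a space in the rightmost column
def pvSpace (mat : List (List String)) (width : Nat) (r : Int) : Bool :=
  ((PySem.List.pyGet? mat (r * 3 + 1)).getD []).getD (width - 1) " " == " "

-- A returns iff, walking the register rows at the rightmost column, the first row that is
-- not an accessible space row is an accessible collision row (or there is none, in which
-- case the deeper columns revisit the same accessible rows at smaller indices)
def pvRowsOK (mat : List (List String)) (width : Nat) (Rl : List Int) : Bool :=
  match Rl.dropWhile (fun r => pvAcc mat width r && pvSpace mat width r) with
  | [] => true
  | r :: _ => pvAcc mat width r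

-- Pre_ is exactly the set of inputs on which Python A returns normally: it excludes the
-- IndexErrors (empty mat, empty gate name outside the table, empty register list/range,
-- and a register row that is out of range or too short being read before any collision).
def Pre_get_available_pos (gate : String) (reg_idxes : List Int) (mat : List (List String)) (num_qubits : Int) (num_bits : Int) : Prop :=
  let g := pyGateName gate
  let L : Int := mat.length
  let width := (mat.head?.getD []).length
  mat ≠ [] ∧
  (g ∈ one_qubit_gates ∨ g ≠ "") ∧
  (if g ∉ one_qubit_gates ∧ (PySem.Str.pyGet? g 0).getD ' ' = 'm' ∧ PySem.Str.strIsdigit (PySem.Str.slice g (some 1) none) = true then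
    reg_idxes ≠ [] ∧
    (let a := reg_idxes.head?.getD 0
     let b := num_qubits + (PySem.Int.ofStr? (PySem.Str.slice g (some 1) none)).getD 0
     a < b ∧
     -- only a bounded prefix of range(a, b) can consist of accessible space rows, so
     -- truncating the walk at a + L + 2 does not change pvRowsOK on range(a, b)
     (0 < width → pvRowsOK mat width (PySem.List.pyRange a (min b (a + L + 2)) 1) = true))
  else
    reg_idxes ≠ [] ∧
    (0 < width → pvRowsOK mat width reg_idxes = true))

instance (gate : String) (reg_idxes : List Int) (mat : List (List String)) (num_qubits : Int) (num_bits : Int) : Decidable (Pre_get_available_pos gate reg_idxes mat num_qubits num_bits) := by unfold Pre_get_available_pos; infer_instance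

def pvWitness_get_available_pos : String × List Int × List (List String) × Int × Int :=
  ("h", [0], [[" "], [" "]], 1, 0)

def Spec_get_available_pos (gate : String) (reg_idxes : List Int) (mat : List (List String)) (num_qubits : Int) (num_bits : Int) (out : Int × Int) : Prop := out = get_available_pos_alt gate reg_idxes mat num_qubits num_bits
instance (gate : String) (reg_idxes : List Int) (mat : List (List String)) (num_qubits : Int) (num_bits : Int) (out : Int × Int) : Decidable (Spec_get_available_pos gate reg_idxes mat num_qubits num_bits out) := by unfold Spec_get_available_pos; infer_instance

-- ===== CLAIM (what is proved, stated in full; the proofs are below) =====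
def Claim_equal_get_available_pos : Prop := ∀ (gate : String) (reg_idxes : List Int) (mat : List (List String)) (num_qubits : Int) (num_bits : Int), Dom_get_available_pos gate reg_idxes mat num_qubits num_bits → Pre_get_available_pos gate reg_idxes mat num_qubits num_bits → Spec_get_available_pos gate reg_idxes mat num_qubits num_bits (get_available_pos gate reg_idxes mat num_qubits num_bits)

-- ===== LEMMAS AND PROOFS =====

-- the greatest j + 1 ≤ n with q j, else 0 — the shared characterisation of both loops
def pvM (q : Nat → Bool) : Nat → Nat
  | 0 => 0
  | n + 1 => if q n then n + 1 else pvM q n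

theorem pvM_le (q : Nat → Bool) (n : Nat) : pvM q n ≤ n := by
  induction n with
  | zero => simp [pvM]
  | succ n ih => simp only [pvM]; split <;> omega

theorem pvM_congr (q q' : Nat → Bool) (n : Nat) (h : ∀ j < n, q j = q' j) :
    pvM q n = pvM q' n := by
  induction n with
  | zero => rfl
  | succ n ih => simp only [pvM, h n (by omega), ih (fun j hj => h j (by omega))]

theorem pvM_ext (q : Nat → Bool) (k n : Nat) (hk : k ≤ n)
    (h : ∀ j, k ≤ j → j < n → q j = false) : pvM q n = pvM q k := by
  induction n with
  | zero => have hk0 : k = 0 := by omega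
            rw [hk0]
  | succ n ih =>
    rcases Nat.lt_or_ge k (n + 1) with hlt | hge
    · simp only [pvM, h n (by omega) (by omega), if_false, Bool.false_eq_true]
      exact ih (by omega) (fun j h1 h2 => h j h1 (by omega))
    · have hk1 : k = n + 1 := by omega
      rw [hk1]

theorem pvM_or (q1 q2 : Nat → Bool) (n : Nat) :
    pvM (fun j => q1 j || q2 j) n = max (pvM q1 n) (pvM q2 n) := by
  induction n with
  | zero => rfl
  | succ n ih =>
    have h1 := pvM_le q1 n
    have h2 := pvM_le q2 n
    simp only [pvM]
    by_cases hq1 : q1 n = true <;> by_cases hq2 : q2 n = true <;>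
      simp [hq1, hq2, ih] <;> omega

theorem pvM_false (n : Nat) : pvM (fun _ => false) n = 0 := by
  induction n with
  | zero => rfl
  | succ n ih => simpa [pvM] using ih

theorem foldl_max_acc {α : Type} (f : α → Nat) (l : List α) (acc : Nat) :
    l.foldl (fun m r => max m (f r)) acc = max acc (l.foldl (fun m r => max m (f r)) 0) := by
  induction l generalizing acc with
  | nil => simp
  | cons r l ih =>
    simp only [List.foldl_cons]
    rw [ih (max acc (f r)), ih (max 0 (f r))]
    omega

-- max over rows of the per-row rightmost = rightmost over any row
theorem pvM_any (c : Int → Nat → Bool) (l : List Int) (n : Nat) :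
    pvM (fun j => l.any (fun r => c r j)) n = l.foldl (fun m r => max m (pvM (c r) n)) 0 := by
  induction l with
  | nil => simpa using pvM_false n
  | cons r l ih =>
    simp only [List.foldl_cons, List.any_cons]
    rw [foldl_max_acc, ← ih, Nat.max_comm, Nat.zero_max, ← pvM_or]
    exact pvM_congr _ _ _ (fun j _ => Bool.or_comm _ _)

-- cell probe: both ports read row (pyGet? mat (r*3+1)) at position j with default ' '
def pvCell (mat : List (List String)) (r : Int) (j : Nat) : Bool :=
  !(((PySem.List.pyGet? mat (r * 3 + 1)).getD []).getD j " " == " ")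

theorem aLoop_eq_pvM (R : (List Int) ⊕ (Int × Int)) (mat : List (List String)) (n : Nat) :
    aLoop R mat n =
      (if pvM (fun j => (regList R).any (fun r => pvCell mat r j)) n = 0 then (0 : Int)
       else (pvM (fun j => (regList R).any (fun r => pvCell mat r j)) n : Int) + 3) := by
  induction n with
  | zero => rfl
  | succ n ih =>
    have hc : aCollide R mat ((n : Int) + 1) = (regList R).any (fun r => pvCell mat r n) := by
      unfold aCollide pvCell
      simp [PySem.List.pyGetD_natCast]
    simp only [aLoop, pvM, hc]
    by_cases h : ((regList R).any (fun r => pvCell mat r n)) = true <;> simp [h, ih]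

theorem bRight_eq_pvM (seg : List String) (k : Nat) :
    bRight seg k = pvM (fun j => !(seg.getD j " " == " ")) k := by
  induction k with
  | zero => rfl
  | succ k ih =>
    simp only [bRight, pvM, ih]
    by_cases h : (seg.getD k " " == " ") = true <;> simp [h]

-- B's per-row scan of the width-truncated row equals pvM of the full-row probe at fuel width
theorem bRow_gen (row : List String) (width : Nat) :
    bRight (row.take width) (row.take width).length
      = pvM (fun j => !(row.getD j " " == " ")) width := by
  rw [bRight_eq_pvM]
  have hlen : (row.take width).length ≤ width := by simp
  have h1 : pvM (fun j => !((row.take width).getD j " " == " ")) width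
      = pvM (fun j => !((row.take width).getD j " " == " ")) (row.take width).length := by
    refine pvM_ext _ _ _ hlen (fun j hj1 hj2 => ?_)
    have hnone : (row.take width)[j]? = none := List.getElem?_eq_none (by omega)
    simp [List.getD_eq_getElem?_getD, hnone]
  rw [← h1]
  refine pvM_congr _ _ _ (fun j hj => ?_)
  have hp : (row.take width)[j]? = row[j]? := List.getElem?_take_of_lt hj
  simp [List.getD_eq_getElem?_getD, hp]

theorem bRow_eq (mat : List (List String)) (r : Int) (width : Nat) :
    (let seg := PySem.List.slice ((PySem.List.pyGet? mat (r * 3 + 1)).getD []) none (some (width : Int))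
     bRight seg seg.length) = pvM (pvCell mat r) width := by
  simp only [PySem.List.slice_to_natCast]
  exact bRow_gen ((PySem.List.pyGet? mat (r * 3 + 1)).getD []) width

theorem foldl_max_le {α : Type} (f : α → Nat) (l : List α) (w : Nat)
    (h : ∀ r ∈ l, f r ≤ w) : l.foldl (fun m r => max m (f r)) w = w := by
  induction l with
  | nil => rfl
  | cons r l ih =>
    simp only [List.foldl_cons]
    have : max w (f r) = w := by have := h r (by simp); omega
    rw [this]
    exact ih (fun r hr => h r (by simp [hr]))

-- B's scan with its early break equals the plain fold of per-row maxima
theorem bScan_eq (mat : List (List String)) (width : Nat) (Rl : List Int) (m : Nat) :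
    bScan mat width Rl m = Rl.foldl (fun m r => max m (pvM (pvCell mat r) width)) m := by
  induction Rl generalizing m with
  | nil => rfl
  | cons r rest ih =>
    simp only [bScan, List.foldl_cons]
    rw [bRow_eq mat r width]
    have hmax : (if pvM (pvCell mat r) width > m then pvM (pvCell mat r) width else m)
        = max m (pvM (pvCell mat r) width) := by split <;> omega
    rw [hmax]
    split
    · next hw =>
      rw [hw]
      exact (foldl_max_le _ _ _ (fun r' _ => by
        have h1 := pvM_le (pvCell mat r') width
        omega)).symm
    · exact ih _

-- the two loop results coincide for every register descriptor, matrix and width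
theorem main_lemma (R : (List Int) ⊕ (Int × Int)) (mat : List (List String)) (width : Nat) :
    aLoop R mat width =
      (let m : Nat := if 0 < width then bScan mat width (regList R) 0 else 0
       if m ≠ 0 then (m : Int) + 3 else 0) := by
  rcases Nat.eq_zero_or_pos width with hw | hw
  · subst hw; rfl
  · simp only [hw, if_pos]
    rw [bScan_eq, ← pvM_any, aLoop_eq_pvM]
    split <;> simp_all

-- ===== VERDICT (by name: the statement is the Claim_ definition above) =====
theorem get_available_pos_spec : Claim_equal_get_available_pos := by
  intro gate reg_idxes mat num_qubits num_bits _ _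
  unfold Spec_get_available_pos get_available_pos get_available_pos_alt
  simp only
  rw [main_lemma]
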